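-- pv_equiv track=rewrite | github.com/vinhpad/GCNII-DocuNet | collate/graph_builder_utils.py | get_mention_to_entity_edges
-- ===== SOURCE A (Python) =====
-- from typing import Tuple, List
--
-- def get_mention_to_entity_edges(num_mention, num_entity, batch_entity_pos) -> Tuple[List[int], List[int]]:
--     u = []
--     v = []
--     for batch_id, entity_pos in enumerate(batch_entity_pos):
--         mention_idx = 0
--         for entity_idx, ent_pos in enumerate(entity_pos):
--             for _ in ent_pos:
--                 u.append(get_id(num_mention, batch_id, mention_idx))
--                 v.append(get_id(num_entity, batch_id, entity_idx))
--                 mention_idx += 1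
--     return u, v
--
-- def get_id(num_col: int, row_idx: int, col_idx: int) -> int:
--     return num_col * row_idx + col_idx
-- ===== SOURCE B (Python) =====
-- def get_mention_to_entity_edges(num_mention, num_entity, batch_entity_pos):
--     # Stage 1: reduce the input to its shape (a matrix of per-entity mention counts).
--     shape = [[len(ent_pos) for ent_pos in entity_pos] for entity_pos in batch_entity_pos]
--     # Stage 2: generate u and v arithmetically from the shape alone.
--     u = [num_mention * batch_id + i
--          for batch_id, lens in enumerate(shape)
--          for i in range(sum(lens))]
--     v = [num_entity * batch_id + entity_idx
--          for batch_id, lens in enumerate(shape)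
--          for entity_idx, k in enumerate(lens)
--          for _ in range(k)]
--     return u, v
-- ===== Notes on version B (the rewrite author's own statement) =====
-- stated objective: alternative
-- what changed: Replaces A's single interleaved triple loop with a running mention counter by a staged design: first reduce the input to a shape matrix of per-entity mention counts, then generate u in closed form per batch from the batch's total count and v by replicating each entity id per its count; no mutable counter or interleaved appends remain.
import Mathlib
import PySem

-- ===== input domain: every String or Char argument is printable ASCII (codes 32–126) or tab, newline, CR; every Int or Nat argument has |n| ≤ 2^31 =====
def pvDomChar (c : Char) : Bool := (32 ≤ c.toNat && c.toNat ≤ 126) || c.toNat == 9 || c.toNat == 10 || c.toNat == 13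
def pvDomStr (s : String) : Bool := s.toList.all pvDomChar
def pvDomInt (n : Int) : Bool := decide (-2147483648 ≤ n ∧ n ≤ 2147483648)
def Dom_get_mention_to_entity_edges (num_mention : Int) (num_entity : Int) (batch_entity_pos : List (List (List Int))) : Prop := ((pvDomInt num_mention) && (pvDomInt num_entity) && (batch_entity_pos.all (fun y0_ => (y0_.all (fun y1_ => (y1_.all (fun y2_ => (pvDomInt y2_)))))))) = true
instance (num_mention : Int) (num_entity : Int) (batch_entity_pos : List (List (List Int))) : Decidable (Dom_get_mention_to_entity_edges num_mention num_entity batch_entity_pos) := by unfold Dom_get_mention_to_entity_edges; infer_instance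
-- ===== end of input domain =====

-- B first reduces the input to a shape matrix of per-entity mention counts, then generates
-- u per batch in closed form from the batch's total count and v by replicating entity ids,
-- instead of A's interleaved triple loop with a running mention counter (same cost).

-- ===== PORT A =====
def get_id (num_col : Int) (row_idx : Int) (col_idx : Int) : Int :=
  num_col * row_idx + col_idx

def get_mention_to_entity_edges (num_mention : Int) (num_entity : Int) (batch_entity_pos : List (List (List Int))) : List Int × List Int :=
  (PySem.List.enumerate batch_entity_pos).foldl
    (fun (uv : List Int × List Int) (p : Int × List (List Int)) =>
      ((PySem.List.enumerate p.2).foldl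
        (fun (s : (List Int × List Int) × Int) (q : Int × List Int) =>
          q.2.foldl
            (fun (s2 : (List Int × List Int) × Int) (_ : Int) =>
              ((s2.1.1 ++ [get_id num_mention p.1 s2.2],
                s2.1.2 ++ [get_id num_entity p.1 q.1]), s2.2 + 1))
            s)
        (uv, 0)).1)
    ([], [])

-- ===== PORT B =====
def get_mention_to_entity_edges_alt (num_mention : Int) (num_entity : Int) (batch_entity_pos : List (List (List Int))) : List Int × List Int :=
  let shape : List (List Int) :=
    batch_entity_pos.map (fun entity_pos => entity_pos.map (fun ent_pos => (ent_pos.length : Int)))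
  let u : List Int :=
    (PySem.List.enumerate shape).flatMap
      (fun p => (PySem.List.pyRange 0 p.2.sum 1).map (fun i => num_mention * p.1 + i))
  let v : List Int :=
    (PySem.List.enumerate shape).flatMap
      (fun p => (PySem.List.enumerate p.2).flatMap
        (fun q => (PySem.List.pyRange 0 q.2 1).map (fun _ => num_entity * p.1 + q.1)))
  (u, v)

-- ===== PRECONDITION & SPEC =====
def Spec_get_mention_to_entity_edges (num_mention : Int) (num_entity : Int) (batch_entity_pos : List (List (List Int))) (out : List Int × List Int) : Prop := out = get_mention_to_entity_edges_alt num_mention num_entity batch_entity_pos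
instance (num_mention : Int) (num_entity : Int) (batch_entity_pos : List (List (List Int))) (out : List Int × List Int) : Decidable (Spec_get_mention_to_entity_edges num_mention num_entity batch_entity_pos out) := by unfold Spec_get_mention_to_entity_edges; infer_instance

-- ===== CLAIM =====
def Claim_equal_get_mention_to_entity_edges : Prop := ∀ (num_mention : Int) (num_entity : Int) (batch_entity_pos : List (List (List Int))), Dom_get_mention_to_entity_edges num_mention num_entity batch_entity_pos → Spec_get_mention_to_entity_edges num_mention num_entity batch_entity_pos (get_mention_to_entity_edges num_mention num_entity batch_entity_pos)

-- ===== LEMMAS AND PROOFS =====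

-- enumerate commutes with map on the elements
theorem enumerate_map {α β : Type} (f : α → β) (xs : List α) :
    ∀ (s : Int), PySem.List.enumerate (xs.map f) s
      = (PySem.List.enumerate xs s).map (fun p => (p.1, f p.2)) := by
  induction xs with
  | nil => intro s; simp [PySem.List.enumerate_nil]
  | cons x xs ih => intro s; simp [PySem.List.enumerate_cons, ih]

-- total number of mentions in one batch's entity list
def totLen (eps : List (List Int)) : Nat := (eps.map List.length).sum

-- A's innermost loop over one entity's mention list, fully characterised.
theorem inner_loop_eq (nm ne b e : Int) (ep : List Int) :
    ∀ (u v : List Int) (m : Int),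
    ep.foldl
      (fun (s2 : (List Int × List Int) × Int) (_ : Int) =>
        ((s2.1.1 ++ [get_id nm b s2.2], s2.1.2 ++ [get_id ne b e]), s2.2 + 1))
      ((u, v), m)
    = ((u ++ (List.range ep.length).map (fun i : Nat => nm * b + (m + (i : Int))),
        v ++ List.replicate ep.length (ne * b + e)), m + ep.length) := by
  induction ep with
  | nil => intro u v m; simp
  | cons x xs ih =>
    intro u v m
    simp only [List.foldl_cons, ih (u ++ [get_id nm b m]) (v ++ [get_id ne b e]) (m + 1),
      List.length_cons, Prod.mk.injEq]
    refine ⟨⟨?_, by simp [List.replicate_succ, get_id]⟩, by push_cast; ring⟩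
    simp [List.range_succ_eq_map, List.map_map, Function.comp_def, get_id]
    intro i _
    omega

-- one entity's replicate block equals B's range-of-count block
theorem replicate_eq_range_block (c : Int) (n : Nat) :
    List.replicate n c = (PySem.List.pyRange 0 (n : Int) 1).map (fun _ => c) := by
  rw [PySem.List.pyRange_one]
  simp [List.map_map, Function.comp_def, List.map_const']

-- A's middle loop (over entities of one batch) characterised by range + flatMap of blocks.
theorem middle_loop_eq (nm ne b : Int) (eps : List (List Int)) :
    ∀ (e0 : Int) (u v : List Int) (m : Int),
    (PySem.List.enumerate eps e0).foldl
      (fun (s : (List Int × List Int) × Int) (q : Int × List Int) =>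
        q.2.foldl
          (fun (s2 : (List Int × List Int) × Int) (_ : Int) =>
            ((s2.1.1 ++ [get_id nm b s2.2], s2.1.2 ++ [get_id ne b q.1]), s2.2 + 1))
          s)
      ((u, v), m)
    = ((u ++ (List.range (totLen eps)).map (fun i : Nat => nm * b + (m + (i : Int))),
        v ++ (PySem.List.enumerate eps e0).flatMap
          (fun q => List.replicate q.2.length (ne * b + q.1))), m + totLen eps) := by
  induction eps with
  | nil => intro e0 u v m; simp [PySem.List.enumerate_nil, totLen]
  | cons ep eps ih =>
    intro e0 u v m
    simp only [PySem.List.enumerate_cons, List.foldl_cons, inner_loop_eq, ih, Prod.mk.injEq,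
      List.flatMap_cons, List.append_assoc]
    refine ⟨⟨?_, by trivial⟩, by simp [totLen]; ring⟩
    simp only [totLen, List.map_cons, List.sum_cons, List.range_add, List.map_append,
      List.map_map, Function.comp_def]
    congr 2
    apply List.map_congr_left; intro i _; push_cast; ring

-- B's per-batch u block in terms of totLen
theorem b_u_block (nm b : Int) (eps : List (List Int)) :
    (PySem.List.pyRange 0 ((eps.map (fun ep => (ep.length : Int))).sum) 1).map
        (fun i => nm * b + i)
      = (List.range (totLen eps)).map (fun i : Nat => nm * b + ((0 : Int) + (i : Int))) := by
  have hs : (eps.map (fun ep => (ep.length : Int))).sum = ((totLen eps : Nat) : Int) := by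
    induction eps with
    | nil => simp [totLen]
    | cons ep eps ih => simp [totLen, List.map_cons, List.sum_cons] at *; omega
  rw [hs, PySem.List.pyRange_one]
  simp [List.map_map, Function.comp_def]

-- both programs agree from the empty accumulator
theorem outer_loop_eq (nm ne : Int) (bep : List (List (List Int))) :
    ∀ (b0 : Int) (u v : List Int),
    (PySem.List.enumerate bep b0).foldl
      (fun (uv : List Int × List Int) (p : Int × List (List Int)) =>
        ((PySem.List.enumerate p.2).foldl
          (fun (s : (List Int × List Int) × Int) (q : Int × List Int) =>
            q.2.foldl
              (fun (s2 : (List Int × List Int) × Int) (_ : Int) =>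
                ((s2.1.1 ++ [get_id nm p.1 s2.2],
                  s2.1.2 ++ [get_id ne p.1 q.1]), s2.2 + 1))
              s)
          (uv, 0)).1)
      (u, v)
    = (u ++ (PySem.List.enumerate bep b0).flatMap
          (fun p => (List.range (totLen p.2)).map (fun i : Nat => nm * p.1 + ((0:Int) + (i : Int)))),
       v ++ (PySem.List.enumerate bep b0).flatMap
          (fun p => (PySem.List.enumerate p.2).flatMap
            (fun q => List.replicate q.2.length (ne * p.1 + q.1)))) := by
  induction bep with
  | nil => intro b0 u v; simp [PySem.List.enumerate_nil]
  | cons eps bep ih =>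
    intro b0 u v
    simp only [PySem.List.enumerate_cons, List.foldl_cons, middle_loop_eq]
    rw [ih]
    simp [List.flatMap_cons, List.append_assoc]

-- ===== VERDICT =====
theorem get_mention_to_entity_edges_spec : Claim_equal_get_mention_to_entity_edges := by
  intro nm ne bep _
  unfold Spec_get_mention_to_entity_edges get_mention_to_entity_edges get_mention_to_entity_edges_alt
  rw [outer_loop_eq]
  simp only [enumerate_map, List.flatMap_map, List.nil_append]
  congr 1
  · apply List.flatMap_congr
    intro p _
    exact (b_u_block nm p.1 p.2).symm
  · apply List.flatMap_congr
    intro p _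
    apply List.flatMap_congr
    intro q _
    exact replicate_eq_range_block (ne * p.1 + q.1) q.2.length
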